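-- pv_equiv track=rewrite | github.com/parallel-p/please | trunk/please/command_line/word_template.py | one_swap_letter
-- ===== SOURCE A (Python) =====
-- def one_swap_letter(a, b):
--     """Returns True if it is possible to swap two sequent
--        letters in a to get b"""
--     if len(a) != len(b):
--         return False
--     for i in range(len(a) - 1):
--         swap_a = a[:i] + a[i + 1] + a[i] + a[i+2:]
--         if swap_a == b:
--             return True
--     return False
-- ===== SOURCE B (Python) =====
-- def one_swap_letter(a, b):
--     """Returns True if it is possible to swap two sequent
--        letters in a to get b"""
--     if len(a) != len(b):
--         return False
--     n = len(a)
--     for j in range(n):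
--         if a[j] != b[j]:
--             # only a swap at the first mismatch can work
--             return (j + 1 < n and a[j] == b[j + 1] and a[j + 1] == b[j]
--                     and a[j + 2:] == b[j + 2:])
--     # a == b: a swap of two equal adjacent letters leaves a unchanged
--     return any(a[i] == a[i + 1] for i in range(n - 1))
-- ===== Notes on version B (the rewrite author's own statement) =====
-- stated objective: faster
-- what changed: Instead of building and comparing a swapped copy of a for every position, B scans once for the first mismatch and checks that exactly that adjacent pair is cross-swapped (or, if a == b, that some adjacent pair of a is equal).
import Mathlib
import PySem

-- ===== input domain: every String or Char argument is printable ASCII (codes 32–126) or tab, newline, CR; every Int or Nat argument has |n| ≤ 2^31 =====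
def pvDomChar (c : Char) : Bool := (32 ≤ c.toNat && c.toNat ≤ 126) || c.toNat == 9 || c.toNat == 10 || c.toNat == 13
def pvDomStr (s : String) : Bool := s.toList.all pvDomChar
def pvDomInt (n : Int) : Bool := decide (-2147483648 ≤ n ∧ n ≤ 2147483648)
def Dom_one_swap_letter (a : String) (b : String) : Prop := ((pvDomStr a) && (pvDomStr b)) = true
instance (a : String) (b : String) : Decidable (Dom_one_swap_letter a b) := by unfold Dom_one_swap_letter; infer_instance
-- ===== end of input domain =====

-- B replaces A's quadratic try-every-adjacent-swap loop by a single pass over the first mismatch; proved equal on all inputs.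

-- ===== PORT A =====
-- swap_a = a[:i] + a[i+1] + a[i] + a[i+2:]  (indices always in range inside the loop)
def swapAt (l : List Char) (i : Int) : List Char :=
  PySem.List.slice l none (some i)
    ++ PySem.List.pyGetD l (i + 1) default
    :: PySem.List.pyGetD l i default
    :: PySem.List.slice l (some (i + 2)) none

-- the 'for i in range(len(a)-1)' loop with early return True
def loopA (l lb : List Char) : List Int → Bool
  | [] => false
  | i :: rest => if swapAt l i = lb then true else loopA l lb rest

def one_swap_letter (a : String) (b : String) : Bool :=
  let la := a.toList
  let lb := b.toList
  if PySem.List.len la ≠ PySem.List.len lb then false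
  else loopA la lb (PySem.List.pyRange 0 (PySem.List.len la - 1) 1)

-- ===== PORT B =====
-- drop the common equal prefix: returns the suffix pair starting at the first mismatch
def mismatchTail : List Char → List Char → List Char × List Char
  | x :: xs, y :: ys => if x = y then mismatchTail xs ys else (x :: xs, y :: ys)
  | xs, ys => (xs, ys)

-- any(a[i] == a[i+1] for i in range(n-1))
def hasAdj : List Char → Bool
  | x :: x' :: rest => x == x' || hasAdj (x' :: rest)
  | _ => false

def altCore (la lb : List Char) : Bool :=
  match mismatchTail la lb with
  | ([], _) => hasAdj la
  | (x :: x' :: xs, y :: y' :: ys) => x == y' && x' == y && xs == ys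
  | _ => false

def one_swap_letter_alt (a : String) (b : String) : Bool :=
  let la := a.toList
  let lb := b.toList
  if PySem.List.len la ≠ PySem.List.len lb then false
  else altCore la lb

-- ===== PRECONDITION & SPEC =====
def Spec_one_swap_letter (a : String) (b : String) (out : Bool) : Prop := out = one_swap_letter_alt a b
instance (a : String) (b : String) (out : Bool) : Decidable (Spec_one_swap_letter a b out) := by unfold Spec_one_swap_letter; infer_instance

-- ===== CLAIM (what is proved, stated in full; the proofs are below) =====
def Claim_equal_one_swap_letter : Prop := ∀ (a : String) (b : String), Dom_one_swap_letter a b → Spec_one_swap_letter a b (one_swap_letter a b)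

-- ===== LEMMAS AND PROOFS =====

-- the swap at a Nat position, in plain list form
def swapNat (l : List Char) (i : Nat) : List Char :=
  l.take i ++ l.getD (i + 1) default :: l.getD i default :: l.drop (i + 2)

lemma swapAt_natCast (l : List Char) (i : Nat) : swapAt l (i : Int) = swapNat l i := by
  have h1 : (i : Int) + 1 = ((i + 1 : Nat) : Int) := by push_cast; ring
  have h2 : (i : Int) + 2 = ((i + 2 : Nat) : Int) := by push_cast; ring
  unfold swapAt swapNat
  rw [h1, h2, PySem.List.slice_to_natCast, PySem.List.slice_from_natCast,
    PySem.List.pyGetD_natCast, PySem.List.pyGetD_natCast]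

lemma swapNat_cons_succ (x : Char) (l : List Char) (k : Nat) :
    swapNat (x :: l) (k + 1) = x :: swapNat l k := by
  simp [swapNat, List.getD]

lemma swapNat_cons_cons_zero (x x' : Char) (l : List Char) :
    swapNat (x :: x' :: l) 0 = x' :: x :: l := by
  simp [swapNat, List.getD]

lemma loopA_mem (l lb : List Char) (is : List Int) :
    loopA l lb is = true ↔ ∃ i ∈ is, swapAt l i = lb := by
  induction is with
  | nil => simp [loopA]
  | cons i rest ih =>
    simp only [loopA]
    split
    · simp_all
    · simp_all

lemma loopA_iff (la lb : List Char) :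
    loopA la lb (PySem.List.pyRange 0 (PySem.List.len la - 1) 1) = true ↔
      ∃ i : Nat, i + 1 < la.length ∧ swapNat la i = lb := by
  rw [loopA_mem]
  constructor
  · rintro ⟨i, hi, hs⟩
    rw [PySem.List.mem_pyRange_one, PySem.List.len_eq] at hi
    refine ⟨i.toNat, by omega, ?_⟩
    rw [← swapAt_natCast, Int.toNat_of_nonneg hi.1]
    exact hs
  · rintro ⟨n, hn, hs⟩
    refine ⟨(n : Int), ?_, by rw [swapAt_natCast]; exact hs⟩
    rw [PySem.List.mem_pyRange_one, PySem.List.len_eq]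
    omega

lemma mismatchTail_fst_nil_iff (la lb : List Char) (h : la.length = lb.length) :
    (mismatchTail la lb).1 = [] ↔ la = lb := by
  induction la generalizing lb with
  | nil => cases lb with
    | nil => simp [mismatchTail]
    | cons y ys => simp at h
  | cons x xs ih =>
    cases lb with
    | nil => simp at h
    | cons y ys =>
      simp only [mismatchTail]
      split
      · rename_i hxy
        subst hxy
        rw [ih ys (by simpa using h)]
        simp
      · rename_i hxy
        simp [hxy]

lemma hasAdj_iff (l : List Char) :
    hasAdj l = true ↔ ∃ i : Nat, i + 1 < l.length ∧ swapNat l i = l := by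
  induction l with
  | nil => simp [hasAdj]
  | cons x t ih =>
    cases t with
    | nil => simp [hasAdj]
    | cons x' t' =>
      simp only [hasAdj, Bool.or_eq_true, beq_iff_eq, ih]
      constructor
      · rintro (h | ⟨i, hi, hs⟩)
        · exact ⟨0, by simp, by subst h; rw [swapNat_cons_cons_zero]⟩
        · exact ⟨i + 1, by simpa using hi, by rw [swapNat_cons_succ, hs]⟩
      · rintro ⟨i, hi, hs⟩
        cases i with
        | zero =>
          rw [swapNat_cons_cons_zero] at hs
          exact Or.inl (List.cons.injEq .. ▸ hs).1.symm
        | succ k =>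
          rw [swapNat_cons_succ] at hs
          exact Or.inr ⟨k, by simpa using hi, (List.cons.injEq .. ▸ hs).2⟩

lemma altCore_of_fst_nil (la lb : List Char) (h : (mismatchTail la lb).1 = []) :
    altCore la lb = hasAdj la := by
  unfold altCore
  rcases hmt : mismatchTail la lb with ⟨f, sd⟩
  rw [hmt] at h
  simp only at h
  subst h
  rfl

lemma altCore_cons_eq (x y : Char) (xs ys : List Char) (hxy : x = y)
    (hne : (mismatchTail xs ys).1 ≠ []) : altCore (x :: xs) (y :: ys) = altCore xs ys := by
  unfold altCore
  rw [show mismatchTail (x :: xs) (y :: ys) = mismatchTail xs ys by simp [mismatchTail, hxy]]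
  split <;> simp_all

lemma core_iff (la lb : List Char) (h : la.length = lb.length) :
    altCore la lb = true ↔ ∃ i : Nat, i + 1 < la.length ∧ swapNat la i = lb := by
  induction la generalizing lb with
  | nil =>
    cases lb with
    | nil => simp [altCore, mismatchTail, hasAdj]
    | cons y ys => simp at h
  | cons x xs ih =>
    cases lb with
    | nil => simp at h
    | cons y ys =>
      have hlen : xs.length = ys.length := by simpa using h
      by_cases hxy : x = y
      · subst hxy
        by_cases heq : xs = ys
        · -- common prefix is everything: a = b, look for an equal adjacent pair
          subst heq
          rw [altCore_of_fst_nil _ _ ((mismatchTail_fst_nil_iff _ _ rfl).2 rfl),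
            hasAdj_iff]
        · -- first mismatch is inside the tails
          rw [altCore_cons_eq x x xs ys rfl
            (fun hnil => heq ((mismatchTail_fst_nil_iff _ _ hlen).1 hnil)), ih ys hlen]
          constructor
          · rintro ⟨i, hi, hs⟩
            exact ⟨i + 1, by simpa using hi, by rw [swapNat_cons_succ, hs]⟩
          · rintro ⟨i, hi, hs⟩
            cases i with
            | zero =>
              exfalso
              cases xs with
              | nil => exact heq (by cases ys with | nil => rfl | cons _ _ => simp at hlen)
              | cons x2 xs2 =>
                cases ys with
                | nil => simp at hlen
                | cons y2 ys2 =>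
                  rw [swapNat_cons_cons_zero] at hs
                  injection hs with e1 e2
                  injection e2 with e3 e4
                  exact heq (by rw [e1, e3, e4])
            | succ k =>
              rw [swapNat_cons_succ] at hs
              injection hs with e1 e2
              exact ⟨k, by simpa using hi, e2⟩
      · -- heads differ: only a swap at position 0 can work
        have hmt : mismatchTail (x :: xs) (y :: ys) = (x :: xs, y :: ys) := by
          simp [mismatchTail, hxy]
        cases xs with
        | nil =>
          cases ys with
          | nil =>
            unfold altCore
            rw [hmt]
            simp
          | cons _ _ => simp at hlen
        | cons x2 xs2 =>
          cases ys with
          | nil => simp at hlen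
          | cons y2 ys2 =>
            unfold altCore
            rw [hmt]
            simp only [Bool.and_eq_true, beq_iff_eq, List.length_cons]
            constructor
            · rintro ⟨⟨h1, h2⟩, h3⟩
              exact ⟨0, by simp, by rw [swapNat_cons_cons_zero, h2, h1, h3]⟩
            · rintro ⟨i, hi, hs⟩
              cases i with
              | zero =>
                rw [swapNat_cons_cons_zero] at hs
                injection hs with e1 e2
                injection e2 with e3 e4
                exact ⟨⟨e3, e1⟩, e4⟩
              | succ k =>
                rw [swapNat_cons_succ] at hs
                injection hs with e1 e2
                exact absurd e1 hxy

-- ===== VERDICT (by name: the statement is the Claim_ definition above) =====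
theorem one_swap_letter_spec : Claim_equal_one_swap_letter := by
  intro a b _
  unfold Spec_one_swap_letter one_swap_letter one_swap_letter_alt
  by_cases h : (PySem.List.len a.toList : Int) ≠ PySem.List.len b.toList
  · rw [if_pos h, if_pos h]
  · rw [if_neg h, if_neg h]
    have hlen : a.toList.length = b.toList.length := by
      simp only [PySem.List.len_eq] at h; omega
    rw [Bool.eq_iff_iff, loopA_iff, core_iff _ _ hlen]
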